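-- pv_equiv track=rewrite | github.com/zlind0/PdfOCRTTS | run.py | has_repeated_phrase_at_end
-- ===== SOURCE A (Python) =====
-- def has_repeated_phrase_at_end(text, min_repeat=5, max_phrase_length=30):
--     """
--     检查文本末尾是否有短语重复多次
--     :param text: 要检查的文本
--     :param min_repeat: 最小重复次数（默认5次）
--     :param max_phrase_length: 短语最大长度（默认30字）
--     :return: 如果存在重复短语返回True，否则返回False
--     """
--     n = len(text)
--     if n < min_repeat:  # 文本太短无法重复
--         return False
--
--     # 遍历所有可能的短语长度（1到max_phrase_length）
--     for phrase_len in range(1, max_phrase_length + 1):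
--         required_length = min_repeat * phrase_len
--         if n < required_length:
--             continue  # 文本长度不足
--
--         # 提取末尾需要检查的片段
--         segment = text[-required_length:]
--
--         # 检查片段是否满足周期性（重复特征）
--         is_periodic = True
--         for j in range(0, required_length - phrase_len):
--             if segment[j] != segment[j + phrase_len]:
--                 is_periodic = False
--                 break
--
--         if is_periodic:
--             return True
--
--     return False
-- ===== SOURCE B (Python) =====
-- def has_repeated_phrase_at_end(text, min_repeat=5, max_phrase_length=30):
--     n = len(text)
--     if n < min_repeat:
--         return False
--
--     def tail_is_periodic(phrase_len):
--         required_length = min_repeat * phrase_len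
--         if n < required_length:
--             return False
--         segment = text[-required_length:]
--         base = segment[:phrase_len]
--         return all(segment[i * phrase_len:(i + 1) * phrase_len] == base
--                    for i in range(min_repeat))
--
--     return any(tail_is_periodic(p) for p in range(1, max_phrase_length + 1))
-- ===== Notes on version B (the rewrite author's own statement) =====
-- stated objective: simpler
-- what changed: A's inner character-by-character periodicity scan (with a mutable flag and break) is replaced by comparing the tail segment's min_repeat phrase-sized chunks against its first chunk with all(...), and the outer loop becomes an any(...) over phrase lengths via a tail_is_periodic helper.
import Mathlib
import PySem

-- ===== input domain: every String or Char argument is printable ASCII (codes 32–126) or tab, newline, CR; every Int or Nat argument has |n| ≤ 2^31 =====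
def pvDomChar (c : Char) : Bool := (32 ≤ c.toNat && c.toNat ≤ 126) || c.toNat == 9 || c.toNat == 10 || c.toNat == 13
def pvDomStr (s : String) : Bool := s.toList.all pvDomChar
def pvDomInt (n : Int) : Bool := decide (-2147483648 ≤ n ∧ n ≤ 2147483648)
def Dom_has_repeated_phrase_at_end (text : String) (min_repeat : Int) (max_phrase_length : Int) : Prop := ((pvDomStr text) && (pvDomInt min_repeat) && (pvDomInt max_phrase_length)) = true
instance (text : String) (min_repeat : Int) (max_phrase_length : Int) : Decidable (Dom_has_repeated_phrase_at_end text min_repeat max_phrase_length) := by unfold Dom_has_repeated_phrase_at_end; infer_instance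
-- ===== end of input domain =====

-- B replaces A's character-by-character periodicity loop over the tail segment by a
-- block comparison of its min_repeat phrase-sized chunks against the first chunk (objective: simpler).

-- ===== PORT A =====
-- A's for-loop over phrase_len (a lazy range with early return True), as fuel-counted tail recursion
def pvForA (s : List Char) (n min_repeat : Int) (phrase_len : Int) : Nat → Bool
  | 0 => false
  | fuel + 1 =>
    let required_length := min_repeat * phrase_len
    if n < required_length then pvForA s n min_repeat (phrase_len + 1) fuel  -- continue
    else
      -- segment = text[-required_length:]
      let segment := PySem.List.slice s (some (-required_length)) none
      -- is_periodic loop with early break: once a mismatch sets it false it stays false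
      let is_periodic := (PySem.List.pyRange 0 (required_length - phrase_len)).foldl
        (fun is_periodic j =>
          if PySem.List.pyGetD segment j ' ' != PySem.List.pyGetD segment (j + phrase_len) ' '
          then false else is_periodic) true
      if is_periodic then true else pvForA s n min_repeat (phrase_len + 1) fuel

def has_repeated_phrase_at_end (text : String) (min_repeat : Int) (max_phrase_length : Int) : Bool :=
  let s := text.toList
  let n : Int := s.length
  if n < min_repeat then false
  else pvForA s n min_repeat 1 max_phrase_length.toNat  -- range(1, max_phrase_length+1)

-- ===== PORT B =====
-- helper tail_is_periodic of Source B
def pvTailIsPeriodic (s : List Char) (n min_repeat phrase_len : Int) : Bool :=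
  let required_length := min_repeat * phrase_len
  if n < required_length then false
  else
    let segment := PySem.List.slice s (some (-required_length)) none
    let base := PySem.List.slice segment none (some phrase_len)
    (PySem.List.pyRange 0 min_repeat).all (fun i =>
      PySem.List.slice segment (some (i * phrase_len)) (some ((i + 1) * phrase_len)) == base)

-- any(tail_is_periodic(p) for p in range(1, max_phrase_length+1)): lazy, early True
def pvForB (s : List Char) (n min_repeat : Int) (p : Int) : Nat → Bool
  | 0 => false
  | fuel + 1 =>
    if pvTailIsPeriodic s n min_repeat p then true else pvForB s n min_repeat (p + 1) fuel

def has_repeated_phrase_at_end_alt (text : String) (min_repeat : Int) (max_phrase_length : Int) : Bool :=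
  let s := text.toList
  let n : Int := s.length
  if n < min_repeat then false
  else pvForB s n min_repeat 1 max_phrase_length.toNat

-- ===== PRECONDITION & SPEC =====
def Spec_has_repeated_phrase_at_end (text : String) (min_repeat : Int) (max_phrase_length : Int) (out : Bool) : Prop := out = has_repeated_phrase_at_end_alt text min_repeat max_phrase_length
instance (text : String) (min_repeat : Int) (max_phrase_length : Int) (out : Bool) : Decidable (Spec_has_repeated_phrase_at_end text min_repeat max_phrase_length out) := by unfold Spec_has_repeated_phrase_at_end; infer_instance

-- ===== CLAIM (what is proved, stated in full; the proofs are below) =====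
def Claim_equal_has_repeated_phrase_at_end : Prop := ∀ (text : String) (min_repeat : Int) (max_phrase_length : Int), Dom_has_repeated_phrase_at_end text min_repeat max_phrase_length → Spec_has_repeated_phrase_at_end text min_repeat max_phrase_length (has_repeated_phrase_at_end text min_repeat max_phrase_length)

-- ===== LEMMAS AND PROOFS =====

lemma pv_mul_le {i M : Nat} (P : Nat) (h : i < M) : i * P + P ≤ M * P := by
  have h1 : (i + 1) * P ≤ M * P := Nat.mul_le_mul_right P h
  have h2 : (i + 1) * P = i * P + P := by ring
  omega

lemma pv_chunk_len (s : List Char) (P M i : Nat) (hlen : s.length = M * P)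
    (hi : i < M) : ((s.drop (i * P)).take P).length = P := by
  have := pv_mul_le P hi
  rw [List.length_take, List.length_drop, hlen]
  omega

lemma pv_chunk_getElem (s : List Char) (P M i t : Nat) (hlen : s.length = M * P)
    (hi : i < M) (ht : t < P) :
    ((s.drop (i * P)).take P).getD t ' ' = s.getD (i * P + t) ' ' := by
  have hle := pv_mul_le P hi
  have hidx : i * P + t < s.length := by rw [hlen]; omega
  have ht' : t < ((s.drop (i * P)).take P).length := by
    rw [pv_chunk_len s P M i hlen hi]; exact ht
  rw [List.getD_eq_getElem _ _ ht', List.getD_eq_getElem _ _ hidx]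
  simp

-- core equivalence: char-by-char periodicity of s (length M*P) ⟺ all M chunks equal the first
lemma pv_periodic_iff_chunks (s : List Char) (P M : Nat) (hP : 1 ≤ P)
    (hlen : s.length = M * P) :
    (∀ j < (M - 1) * P, s.getD j ' ' = s.getD (j + P) ' ') ↔
    (∀ i < M, (s.drop (i * P)).take P = s.take P) := by
  constructor
  · intro hper i
    induction i with
    | zero => intro _; simp
    | succ i ih =>
      intro hi
      have hchunk : (s.drop ((i + 1) * P)).take P = (s.drop (i * P)).take P := by
        apply List.ext_getElem
        · rw [pv_chunk_len s P M (i+1) hlen hi, pv_chunk_len s P M i hlen (by omega)]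
        · intro t ht1 ht2
          have htP : t < P := by
            rw [pv_chunk_len s P M (i+1) hlen hi] at ht1; exact ht1
          have e1 := pv_chunk_getElem s P M (i+1) t hlen hi htP
          have e2 := pv_chunk_getElem s P M i t hlen (by omega) htP
          have hj : i * P + t < (M - 1) * P := by
            have h5 := pv_mul_le P (show i < M - 1 by omega)
            omega
          have hper' := hper (i * P + t) hj
          have harg : i * P + t + P = (i + 1) * P + t := by ring
          rw [← List.getD_eq_getElem _ ' ' ht1, ← List.getD_eq_getElem _ ' ' ht2,
            e1, e2, ← harg, ← hper']
      rw [hchunk]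
      exact ih (by omega)
  · intro hchunk j hj
    have hP0 : 0 < P := hP
    have hM : 1 ≤ M := by
      by_contra h
      have hM0 : M = 0 := by omega
      simp [hM0] at hj
    set i := j / P with hi
    set t := j % P with htdef
    have ht : t < P := Nat.mod_lt _ hP0
    have hjeq : i * P + t = j := by
      rw [hi, htdef, Nat.mul_comm]; exact Nat.div_add_mod j P
    have hilt : i < M - 1 := by
      by_contra h
      have : (M - 1) * P ≤ i * P := Nat.mul_le_mul_right P (by omega)
      omega
    have c1 := pv_chunk_getElem s P M i t hlen (by omega) ht
    have c2 := pv_chunk_getElem s P M (i + 1) t hlen (by omega) ht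
    have h1 := hchunk i (by omega)
    have h2 := hchunk (i + 1) (by omega)
    have harg : i * P + t + P = (i + 1) * P + t := by ring
    rw [← hjeq, harg, ← c1, ← c2, h1, h2]

-- the same equivalence on the Bool level, in the shapes the two ports produce
lemma pv_bool_eq (s : List Char) (P M : Nat) (hP : 1 ≤ P) (hlen : s.length = M * P) :
    (!(List.range ((M - 1) * P)).any (fun j => s.getD j ' ' != s.getD (j + P) ' '))
    = (List.range M).all (fun i => (s.drop (i * P)).take P == s.take P) := by
  rw [Bool.eq_iff_iff]
  simp only [Bool.not_eq_true', List.any_eq_false, List.all_eq_true, List.mem_range,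
    bne_iff_ne, ne_eq, Decidable.not_not, beq_iff_eq]
  exact pv_periodic_iff_chunks s P M hP hlen

-- inner loops agree: A's mismatch scan over the segment equals B's chunk comparison
lemma pv_inner_eq (s : List Char) (min_repeat phrase_len : Int)
    (hp : 1 ≤ phrase_len) (hn : min_repeat * phrase_len ≤ (s.length : Int)) :
    ((PySem.List.pyRange 0 (min_repeat * phrase_len - phrase_len)).foldl
      (fun is_periodic j =>
        if PySem.List.pyGetD (PySem.List.slice s (some (-(min_repeat * phrase_len))) none) j ' '
           != PySem.List.pyGetD (PySem.List.slice s (some (-(min_repeat * phrase_len))) none) (j + phrase_len) ' '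
        then false else is_periodic) true) =
    ((PySem.List.pyRange 0 min_repeat).all (fun i =>
      PySem.List.slice (PySem.List.slice s (some (-(min_repeat * phrase_len))) none)
          (some (i * phrase_len)) (some ((i + 1) * phrase_len)) ==
        PySem.List.slice (PySem.List.slice s (some (-(min_repeat * phrase_len))) none)
          none (some phrase_len))) := by
  rw [PySem.List.foldl_if_false_eq, Bool.true_and]
  by_cases hmr : min_repeat ≤ 0
  · have hr1 : min_repeat * phrase_len - phrase_len ≤ 0 := by nlinarith
    rw [PySem.List.pyRange_one_eq_nil hr1, PySem.List.pyRange_one_eq_nil hmr]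
    simp
  · -- min_repeat ≥ 1: pass to Nat-land
    set M := min_repeat.toNat with hMdef
    set P := phrase_len.toNat with hPdef
    have hmrc : min_repeat = (M : Int) := (Int.toNat_of_nonneg (by omega)).symm
    have hpc : phrase_len = (P : Int) := (Int.toNat_of_nonneg (by omega)).symm
    have hP1 : 1 ≤ P := by omega
    have hM1 : 1 ≤ M := by omega
    -- the segment s[-M*P:] and its length
    have hreq : min_repeat * phrase_len = ((M * P : Nat) : Int) := by
      rw [hmrc, hpc]; push_cast; ring
    have hMP0 : 0 < M * P := Nat.mul_pos hM1 hP1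
    have hMPle : M * P ≤ s.length := by
      rw [hreq] at hn; exact_mod_cast hn
    have hseg : PySem.List.slice s (some (-(min_repeat * phrase_len))) none
        = s.drop (s.length - M * P) := by
      rw [hreq]; exact PySem.List.slice_from_neg_natCast s (M * P) hMP0
    have hseglen : (s.drop (s.length - M * P)).length = M * P := by
      rw [List.length_drop]; omega
    set seg := s.drop (s.length - M * P) with hsegdef
    -- A's index range: M*P - P = (M-1)*P
    have hrange : min_repeat * phrase_len - phrase_len = (((M - 1) * P : Nat) : Int) := by
      rw [hreq, hpc]
      have : (M - 1) * P + P = M * P := by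
        have : M - 1 + 1 = M := by omega
        calc (M - 1) * P + P = (M - 1 + 1) * P := by ring
        _ = M * P := by rw [this]
      push_cast
      omega
    rw [hseg, hrange, hmrc, PySem.List.pyRange_zero_natCast, PySem.List.pyRange_zero_natCast,
      List.any_map, List.all_map]
    have hA : ((fun j => PySem.List.pyGetD seg j ' ' != PySem.List.pyGetD seg (j + phrase_len) ' ')
        ∘ (fun k : Nat => (k : Int)))
        = (fun j : Nat => seg.getD j ' ' != seg.getD (j + P) ' ') := by
      funext j
      simp only [Function.comp]
      rw [hpc, show ((j : Int) + (P : Int)) = ((j + P : Nat) : Int) by push_cast; ring,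
        PySem.List.pyGetD_natCast, PySem.List.pyGetD_natCast]
    have hB : ((fun i => PySem.List.slice seg (some (i * phrase_len)) (some ((i + 1) * phrase_len))
          == PySem.List.slice seg none (some phrase_len)) ∘ (fun k : Nat => (k : Int)))
        = (fun i : Nat => (seg.drop (i * P)).take P == seg.take P) := by
      funext i
      simp only [Function.comp]
      rw [hpc, show ((i : Int) * (P : Int)) = ((i * P : Nat) : Int) by push_cast; ring,
        show (((i : Int) + 1) * (P : Int)) = ((i * P : Nat) : Int) + ((P : Nat) : Int) by
          push_cast; ring,
        PySem.List.slice_natCast_add, PySem.List.slice_to_natCast]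
    rw [hA, hB]
    exact pv_bool_eq seg P M hP1 hseglen

-- the fuel loops are the any-over-pyRange loops
lemma pv_forA_eq (s : List Char) (n mr : Int) : ∀ (fuel : Nat) (pl : Int),
    pvForA s n mr pl fuel = (PySem.List.pyRange pl (pl + fuel)).any (fun phrase_len =>
      if n < mr * phrase_len then false
      else
        (PySem.List.pyRange 0 (mr * phrase_len - phrase_len)).foldl
          (fun is_periodic j =>
            if PySem.List.pyGetD (PySem.List.slice s (some (-(mr * phrase_len))) none) j ' '
               != PySem.List.pyGetD (PySem.List.slice s (some (-(mr * phrase_len))) none)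
                    (j + phrase_len) ' '
            then false else is_periodic) true) := by
  intro fuel
  induction fuel with
  | zero =>
    intro pl
    rw [pvForA, PySem.List.pyRange_one_eq_nil (by omega : pl + ((0 : Nat) : Int) ≤ pl)]
    rfl
  | succ f ih =>
    intro pl
    rw [pvForA, PySem.List.pyRange_one_cons (by push_cast; omega : pl < pl + ((f + 1 : Nat) : Int)),
      List.any_cons]
    have hnext : pl + ((f + 1 : Nat) : Int) = (pl + 1) + ((f : Nat) : Int) := by push_cast; ring
    rw [hnext, ← ih (pl + 1)]
    by_cases h : n < mr * pl
    · simp [h]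
    · simp only [h, if_false]
      by_cases hper : ((PySem.List.pyRange 0 (mr * pl - pl)).foldl
          (fun is_periodic j =>
            if PySem.List.pyGetD (PySem.List.slice s (some (-(mr * pl))) none) j ' '
               != PySem.List.pyGetD (PySem.List.slice s (some (-(mr * pl))) none) (j + pl) ' '
            then false else is_periodic) true) = true
      · simp
      · simp only [Bool.not_eq_true] at hper
        simp

lemma pv_forB_eq (s : List Char) (n mr : Int) : ∀ (fuel : Nat) (pl : Int),
    pvForB s n mr pl fuel
      = (PySem.List.pyRange pl (pl + fuel)).any (fun p => pvTailIsPeriodic s n mr p) := by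
  intro fuel
  induction fuel with
  | zero =>
    intro pl
    rw [pvForB, PySem.List.pyRange_one_eq_nil (by omega : pl + ((0 : Nat) : Int) ≤ pl)]
    rfl
  | succ f ih =>
    intro pl
    rw [pvForB, PySem.List.pyRange_one_cons (by push_cast; omega : pl < pl + ((f + 1 : Nat) : Int)),
      List.any_cons]
    have hnext : pl + ((f + 1 : Nat) : Int) = (pl + 1) + ((f : Nat) : Int) := by push_cast; ring
    rw [hnext, ← ih (pl + 1)]
    by_cases h : pvTailIsPeriodic s n mr pl = true
    · simp [h]
    · simp only [Bool.not_eq_true] at h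
      simp [h]

-- ===== VERDICT (by name: the statement is the Claim_ definition above) =====
theorem has_repeated_phrase_at_end_spec : Claim_equal_has_repeated_phrase_at_end := by
  intro text min_repeat max_phrase_length _
  unfold Spec_has_repeated_phrase_at_end has_repeated_phrase_at_end has_repeated_phrase_at_end_alt
  simp only []
  by_cases hlt : ((text.toList.length : Int) < min_repeat)
  · rw [if_pos hlt, if_pos hlt]
  · rw [if_neg hlt, if_neg hlt, pv_forA_eq, pv_forB_eq]
    apply PySem.List.any_congr_mem
    intro p hp
    have hp1 : 1 ≤ p := (PySem.List.mem_pyRange_one.mp hp).1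
    unfold pvTailIsPeriodic
    simp only []
    by_cases hreq : ((text.toList.length : Int) < min_repeat * p)
    · rw [if_pos hreq, if_pos hreq]
    · rw [if_neg hreq, if_neg hreq]
      exact pv_inner_eq text.toList min_repeat p hp1 (by omega)
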